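-- pv_equiv track=rewrite | github.com/migue559/quda | imss_perfilamiento/udf/udf_get_tipo_de_datos.py | udf_get_tipo_de_datos
-- ===== SOURCE A (Python) =====
-- def udf_get_tipo_de_datos(p_total_nulos, p_total_int, p_total_float, p_total_date, p_total_str, p_total_blank):
--     dict_tipo_datos = {'Cadena': p_total_str, 'Entero': p_total_int, 'Flotante': p_total_float, 'Fecha': p_total_date, 'Blanco': p_total_blank, 'Vacio': p_total_nulos}
--     num_max_dict = max(dict_tipo_datos.values())
--     for x in dict_tipo_datos.keys():
--         if dict_tipo_datos[x] == num_max_dict: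
--             v_tipo_de_dato = x
--             break
--     return v_tipo_de_dato
-- ===== SOURCE B (Python) =====
-- def udf_get_tipo_de_datos(p_total_nulos, p_total_int, p_total_float, p_total_date, p_total_str, p_total_blank):
--     pairs = [('Cadena', p_total_str), ('Entero', p_total_int), ('Flotante', p_total_float),
--              ('Fecha', p_total_date), ('Blanco', p_total_blank), ('Vacio', p_total_nulos)]
--     best_label, best_val = pairs[0]
--     for label, val in pairs[1:]:
--         if val > best_val:
--             best_label, best_val = label, val
--     return best_label
-- ===== Notes on version B (the rewrite author's own statement) =====
-- stated objective: simpler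
-- what changed: Replaced A's two passes (max() over the dict values, then a key scan for the first value equal to that max) by one single-pass argmax over the ordered (label,count) pairs that updates only on a strictly greater count, preserving the first-in-order tie-break.
import Mathlib
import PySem

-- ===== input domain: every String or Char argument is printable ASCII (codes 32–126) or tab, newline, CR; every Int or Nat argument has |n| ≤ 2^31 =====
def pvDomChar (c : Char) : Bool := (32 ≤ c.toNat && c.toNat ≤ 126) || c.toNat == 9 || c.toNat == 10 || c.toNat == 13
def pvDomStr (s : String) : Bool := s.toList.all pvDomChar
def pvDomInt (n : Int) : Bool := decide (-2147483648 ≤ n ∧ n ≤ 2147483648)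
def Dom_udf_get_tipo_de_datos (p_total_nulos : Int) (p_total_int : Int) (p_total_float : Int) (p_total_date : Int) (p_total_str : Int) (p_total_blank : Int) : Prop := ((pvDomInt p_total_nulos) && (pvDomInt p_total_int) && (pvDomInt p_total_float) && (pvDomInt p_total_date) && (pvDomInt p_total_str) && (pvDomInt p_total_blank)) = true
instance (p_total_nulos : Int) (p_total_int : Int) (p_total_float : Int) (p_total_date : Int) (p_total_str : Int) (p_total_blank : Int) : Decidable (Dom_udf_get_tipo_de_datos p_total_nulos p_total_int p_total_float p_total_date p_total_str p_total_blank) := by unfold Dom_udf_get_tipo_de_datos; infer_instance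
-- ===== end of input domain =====

-- B replaces A's max()-then-rescan by one single-pass argmax (strict '>' update keeps the first maximal label); objective: simpler.
-- ===== PORT A =====
def udf_get_tipo_de_datos (p_total_nulos : Int) (p_total_int : Int) (p_total_float : Int) (p_total_date : Int) (p_total_str : Int) (p_total_blank : Int) : String :=
  -- dict values in insertion order: Cadena, Entero, Flotante, Fecha, Blanco, Vacio
  let num_max_dict : Int :=
    [p_total_int, p_total_float, p_total_date, p_total_blank, p_total_nulos].foldl max p_total_str
  -- the for-loop over the keys: first key whose value equals the max
  if p_total_str = num_max_dict then "Cadena"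
  else if p_total_int = num_max_dict then "Entero"
  else if p_total_float = num_max_dict then "Flotante"
  else if p_total_date = num_max_dict then "Fecha"
  else if p_total_blank = num_max_dict then "Blanco"
  else "Vacio"

-- ===== PORT B =====
def udf_get_tipo_de_datos_alt (p_total_nulos : Int) (p_total_int : Int) (p_total_float : Int) (p_total_date : Int) (p_total_str : Int) (p_total_blank : Int) : String :=
  let rest : List (String × Int) :=
    [("Entero", p_total_int), ("Flotante", p_total_float), ("Fecha", p_total_date),
     ("Blanco", p_total_blank), ("Vacio", p_total_nulos)]
  (rest.foldl (fun best p => if p.2 > best.2 then p else best) ("Cadena", p_total_str)).1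

-- ===== PRECONDITION & SPEC =====
def Spec_udf_get_tipo_de_datos (p_total_nulos : Int) (p_total_int : Int) (p_total_float : Int) (p_total_date : Int) (p_total_str : Int) (p_total_blank : Int) (out : String) : Prop := out = udf_get_tipo_de_datos_alt p_total_nulos p_total_int p_total_float p_total_date p_total_str p_total_blank
instance (p_total_nulos : Int) (p_total_int : Int) (p_total_float : Int) (p_total_date : Int) (p_total_str : Int) (p_total_blank : Int) (out : String) : Decidable (Spec_udf_get_tipo_de_datos p_total_nulos p_total_int p_total_float p_total_date p_total_str p_total_blank out) := by unfold Spec_udf_get_tipo_de_datos; infer_instance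

-- ===== CLAIM (what is proved, stated in full; the proofs are below) =====
def Claim_equal_udf_get_tipo_de_datos : Prop := ∀ (p_total_nulos : Int) (p_total_int : Int) (p_total_float : Int) (p_total_date : Int) (p_total_str : Int) (p_total_blank : Int), Dom_udf_get_tipo_de_datos p_total_nulos p_total_int p_total_float p_total_date p_total_str p_total_blank → Spec_udf_get_tipo_de_datos p_total_nulos p_total_int p_total_float p_total_date p_total_str p_total_blank (udf_get_tipo_de_datos p_total_nulos p_total_int p_total_float p_total_date p_total_str p_total_blank)

-- ===== LEMMAS AND PROOFS =====
theorem pv_argmax_step (s t : String) (v w : Int) :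
    (if w > v then (t, w) else (s, v)) = (if w ≤ v then s else t, max v w) := by
  split_ifs <;> simp_all <;> omega

-- ===== VERDICT (by name: the statement is the Claim_ definition above) =====
set_option maxHeartbeats 1000000 in
theorem udf_get_tipo_de_datos_spec : Claim_equal_udf_get_tipo_de_datos := by
  intro n i fl d st bl hdom
  clear hdom
  unfold Spec_udf_get_tipo_de_datos udf_get_tipo_de_datos udf_get_tipo_de_datos_alt
  simp only [List.foldl, pv_argmax_step]
  split_ifs <;> first | rfl | omega
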